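-- pv_equiv track=rewrite | github.com/Benbok/pediatrics | scripts/generate_budesonide_jsons.py | choose_using
-- ===== SOURCE A (Python) =====
-- from typing import Any, Dict, Iterable, List, Optional, Sequence, Tuple
--
-- def choose_using(values: Iterable[Optional[str]]) -> Optional[str]:
--     priority = {"Not": 4, "Care": 3, "Qwes": 2, "Can": 1}
--     best = None
--     best_score = -1
--     for value in values:
--         if value not in priority:
--             continue
--         score = priority[value]
--         if score > best_score:
--             best = value
--             best_score = score
--     return best
-- ===== SOURCE B (Python) =====
-- def choose_using(values):
--     present = set(values)
--     for key in ("Not", "Care", "Qwes", "Can"):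
--         if key in present:
--             return key
--     return None
-- ===== Notes on version B (the rewrite author's own statement) =====
-- stated objective: idiomatic
-- what changed: B builds a membership set of the input once and walks the fixed priority table in descending order, returning the first key present, instead of scanning the data while tracking a running best score.
import Mathlib
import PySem

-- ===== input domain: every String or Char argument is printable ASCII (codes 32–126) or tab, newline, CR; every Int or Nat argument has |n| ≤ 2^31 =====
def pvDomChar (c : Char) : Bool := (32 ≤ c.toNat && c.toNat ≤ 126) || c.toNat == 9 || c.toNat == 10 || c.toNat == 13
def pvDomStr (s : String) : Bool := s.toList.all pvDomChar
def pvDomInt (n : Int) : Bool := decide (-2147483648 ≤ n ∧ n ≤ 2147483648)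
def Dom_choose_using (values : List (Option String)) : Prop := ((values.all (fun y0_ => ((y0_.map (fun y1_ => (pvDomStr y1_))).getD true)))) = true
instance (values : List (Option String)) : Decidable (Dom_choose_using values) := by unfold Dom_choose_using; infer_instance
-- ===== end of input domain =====

-- B walks the fixed priority table in descending order probing a membership set built once, instead of scanning the data while tracking a running best score (idiomatic, same cost).


-- ===== PORT A =====
def choose_using (values : List (Option String)) : Option String :=
  let priority : PySem.Dict String Int :=
    PySem.Dict.ofList [("Not", 4), ("Care", 3), ("Qwes", 2), ("Can", 1)]
  (values.foldl (fun (st : Option String × Int) value =>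
      match value with
      | none => st            -- 'value not in priority' (None is never a key): continue
      | some v =>
        match priority.get? v with
        | none => st          -- 'value not in priority': continue
        | some score => if score > st.2 then (some v, score) else st)
    (none, -1)).1

-- ===== PORT B =====
def choose_using_alt (values : List (Option String)) : Option String :=
  let present : PySem.Set (Option String) := PySem.Set.ofList values
  ["Not", "Care", "Qwes", "Can"].find? (fun key => PySem.Set.contains present (some key))

-- ===== PRECONDITION & SPEC =====
def Spec_choose_using (values : List (Option String)) (out : Option String) : Prop := out = choose_using_alt values
instance (values : List (Option String)) (out : Option String) : Decidable (Spec_choose_using values out) := by unfold Spec_choose_using; infer_instance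

-- ===== CLAIM (what is proved, stated in full; the proofs are below) =====
def Claim_equal_choose_using : Prop := ∀ (values : List (Option String)), Dom_choose_using values → Spec_choose_using values (choose_using values)

-- ===== LEMMAS AND PROOFS =====

/-- rank of a value under A's priority dict (-1 for non-keys / None). -/
def rk (b : Option String) : Int :=
  if b = some "Not" then 4
  else if b = some "Care" then 3
  else if b = some "Qwes" then 2
  else if b = some "Can" then 1
  else -1

/-- A's loop body, named. -/
def fA (st : Option String × Int) (value : Option String) : Option String × Int :=
  match value with
  | none => st
  | some v =>
    match (PySem.Dict.ofList [("Not", (4:Int)), ("Care", 3), ("Qwes", 2), ("Can", 1)]).get? v with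
    | none => st
    | some score => if score > st.2 then (some v, score) else st

lemma rk_ge (b : Option String) : -1 ≤ rk b := by unfold rk; split_ifs <;> omega

lemma rk_le (b : Option String) : rk b ≤ 4 := by unfold rk; split_ifs <;> omega

lemma dictnorm : PySem.Dict.ofList [("Not", (4:Int)), ("Care", 3), ("Qwes", 2), ("Can", 1)] =
    PySem.Dict.mk [("Not", 4), ("Care", 3), ("Qwes", 2), ("Can", 1)] := by decide

lemma get_other (s : String) (h1 : s ≠ "Not") (h2 : s ≠ "Care") (h3 : s ≠ "Qwes") (h4 : s ≠ "Can") :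
    (PySem.Dict.ofList [("Not", (4:Int)), ("Care", 3), ("Qwes", 2), ("Can", 1)]).get? s = none := by
  rw [dictnorm, PySem.Dict.get?_eq_none_iff_not_mem_keys]
  simp [PySem.Dict.keys_mk, h1, h2, h3, h4]

lemma rk_other (s : String) (h1 : s ≠ "Not") (h2 : s ≠ "Care") (h3 : s ≠ "Qwes") (h4 : s ≠ "Can") :
    rk (some s) = -1 := by simp [rk, h1, h2, h3, h4]

lemma stepA (b v : Option String) :
    fA (b, rk b) v = (if rk v > rk b then v else b, rk (if rk v > rk b then v else b)) := by
  have hge := rk_ge b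
  cases v with
  | none =>
    have hn : rk none = -1 := by decide
    have h : ¬ rk (none : Option String) > rk b := by omega
    simp [fA, h]
  | some s =>
    by_cases h1 : s = "Not"
    · subst h1
      have hg : (PySem.Dict.ofList [("Not", (4:Int)), ("Care", 3), ("Qwes", 2), ("Can", 1)]).get? "Not" = some 4 := by decide
      have hr : rk (some "Not") = 4 := by decide
      simp only [fA, hg, hr]
      split_ifs <;> simp [hr]
    · by_cases h2 : s = "Care"
      · subst h2
        have hg : (PySem.Dict.ofList [("Not", (4:Int)), ("Care", 3), ("Qwes", 2), ("Can", 1)]).get? "Care" = some 3 := by decide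
        have hr : rk (some "Care") = 3 := by decide
        simp only [fA, hg, hr]
        split_ifs <;> simp [hr]
      · by_cases h3 : s = "Qwes"
        · subst h3
          have hg : (PySem.Dict.ofList [("Not", (4:Int)), ("Care", 3), ("Qwes", 2), ("Can", 1)]).get? "Qwes" = some 2 := by decide
          have hr : rk (some "Qwes") = 2 := by decide
          simp only [fA, hg, hr]
          split_ifs <;> simp [hr]
        · by_cases h4 : s = "Can"
          · subst h4
            have hg : (PySem.Dict.ofList [("Not", (4:Int)), ("Care", 3), ("Qwes", 2), ("Can", 1)]).get? "Can" = some 1 := by decide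
            have hr : rk (some "Can") = 1 := by decide
            simp only [fA, hg, hr]
            split_ifs <;> simp [hr]
          · have hg := get_other s h1 h2 h3 h4
            have hr := rk_other s h1 h2 h3 h4
            have h : ¬ rk (some s) > rk b := by omega
            simp [fA, hg, h]

/-- characterisation of A's fold result. -/
def tgt (vs : List (Option String)) (b : Option String) : Option String :=
  if (some "Not") ∈ vs ∧ rk b < 4 then some "Not"
  else if (some "Care") ∈ vs ∧ rk b < 3 then some "Care"
  else if (some "Qwes") ∈ vs ∧ rk b < 2 then some "Qwes"
  else if (some "Can") ∈ vs ∧ rk b < 1 then some "Can"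
  else b

lemma tgt_cons (v : Option String) (t : List (Option String)) (b : Option String) :
    tgt t (if rk v > rk b then v else b) = tgt (v :: t) b := by
  have hge := rk_ge b
  have hle := rk_le b
  by_cases hK1 : v = some "Not"
  · subst_vars
    have hr : rk (some "Not") = 4 := by decide
    rw [hr]
    by_cases hb : (4:Int) > rk b
    · rw [if_pos hb]
      unfold tgt
      simp [hr, List.mem_cons, hb]
    · rw [if_neg hb]
      unfold tgt
      simp [hr, List.mem_cons, (by omega : ¬ rk b < 4), (by omega : ¬ rk b < 3), (by omega : ¬ rk b < 2), (by omega : ¬ rk b < 1)]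
  by_cases hK2 : v = some "Care"
  · subst_vars
    have hr : rk (some "Care") = 3 := by decide
    rw [hr]
    by_cases hb : (3:Int) > rk b
    · rw [if_pos hb]
      unfold tgt
      simp [hr, List.mem_cons, hb, (by omega : rk b < 4)]
    · rw [if_neg hb]
      unfold tgt
      simp [hr, List.mem_cons, (by omega : ¬ rk b < 3), (by omega : ¬ rk b < 2), (by omega : ¬ rk b < 1)]
  by_cases hK3 : v = some "Qwes"
  · subst_vars
    have hr : rk (some "Qwes") = 2 := by decide
    rw [hr]
    by_cases hb : (2:Int) > rk b
    · rw [if_pos hb]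
      unfold tgt
      simp [hr, List.mem_cons, hb, (by omega : rk b < 4), (by omega : rk b < 3)]
    · rw [if_neg hb]
      unfold tgt
      simp [hr, List.mem_cons, (by omega : ¬ rk b < 2), (by omega : ¬ rk b < 1)]
  by_cases hK4 : v = some "Can"
  · subst_vars
    have hr : rk (some "Can") = 1 := by decide
    rw [hr]
    by_cases hb : (1:Int) > rk b
    · rw [if_pos hb]
      unfold tgt
      simp [hr, List.mem_cons, hb, (by omega : rk b < 4), (by omega : rk b < 3), (by omega : rk b < 2)]
    · rw [if_neg hb]
      unfold tgt
      simp [hr, List.mem_cons, (by omega : ¬ rk b < 1)]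
  -- v is None or a non-key string: the step is a no-op
  have hr : rk v = -1 := by
    cases v with
    | none => decide
    | some s =>
      exact rk_other s (fun h => hK1 (by rw [h])) (fun h => hK2 (by rw [h]))
        (fun h => hK3 (by rw [h])) (fun h => hK4 (by rw [h]))
  have hnb : ¬ rk v > rk b := by omega
  rw [if_neg hnb]
  unfold tgt
  simp only [List.mem_cons, Ne.symm hK1, Ne.symm hK2, Ne.symm hK3, Ne.symm hK4, false_or]

lemma loopA (vs : List (Option String)) : ∀ b, (vs.foldl fA (b, rk b)).1 = tgt vs b := by
  induction vs with
  | nil => intro b; simp [tgt]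
  | cons v t ih =>
    intro b
    rw [List.foldl_cons, stepA, ih, tgt_cons]

lemma altB (vs : List (Option String)) : choose_using_alt vs = tgt vs none := by
  have hc : ∀ (x : Option String), PySem.Set.contains (PySem.Set.ofList vs) x = decide (x ∈ vs) := by
    intro x
    by_cases h : x ∈ vs
    · simp [h, PySem.Set.contains_iff, PySem.Set.mem_ofList]
    · simp only [h, decide_false]
      rw [← Bool.not_eq_true]
      intro hcon
      exact h ((PySem.Set.mem_ofList _ _).1 ((PySem.Set.contains_iff _ _).1 hcon))
  have hn : rk (none : Option String) = -1 := by decide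
  unfold choose_using_alt tgt
  simp only [hn]
  by_cases m1 : (some "Not") ∈ vs
  · simp [List.find?, hc, m1]
  · by_cases m2 : (some "Care") ∈ vs
    · simp [List.find?, hc, m1, m2]
    · by_cases m3 : (some "Qwes") ∈ vs
      · simp [List.find?, hc, m1, m2, m3]
      · by_cases m4 : (some "Can") ∈ vs
        · simp [List.find?, hc, m1, m2, m3, m4]
        · simp [List.find?, hc, m1, m2, m3, m4]

-- ===== VERDICT (by name: the statement is the Claim_ definition above) =====
theorem choose_using_spec : Claim_equal_choose_using := by
  intro values _
  unfold Spec_choose_using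
  have hA : choose_using values = (values.foldl fA ((none : Option String), rk none)).1 := rfl
  rw [hA, loopA, altB]
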